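-- pv_equiv track=rewrite | github.com/andrewcho-dev/opsconductor-ng | discovery-service/main.py | select_preferred_service
-- ===== SOURCE A (Python) =====
-- from typing import List, Optional, Dict, Any, Tuple
--
-- def select_preferred_service(services: List[Dict]) -> Optional[Dict]:
--     """Select preferred service based on security and availability"""
--     if not services:
--         return None
--
--     # Priority: HTTPS WinRM > SSH > HTTP WinRM > RDP > Others
--     winrm_https = next((s for s in services if s['type'] == 'winrm' and s['secure']), None)
--     if winrm_https:
--         return winrm_https
--
--     ssh_service = next((s for s in services if s['type'] == 'ssh'), None)
--     if ssh_service: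
--         return ssh_service
--
--     winrm_http = next((s for s in services if s['type'] == 'winrm' and not s['secure']), None)
--     if winrm_http:
--         return winrm_http
--
--     # Fallback to first available service
--     return services[0]
-- ===== SOURCE B (Python) =====
-- from typing import List, Optional, Dict
--
--
-- def select_preferred_service(services: List[Dict]) -> Optional[Dict]:
--     """Select preferred service based on security and availability."""
--     if not services:
--         return None
--
--     def rank(s):
--         if s['type'] == 'winrm':
--             return 0 if s['secure'] else 2
--         if s['type'] == 'ssh':
--             return 1
--         return 3
--
--     # min returns the first element attaining the minimal rank, which matches
--     # A's cascade of short-circuiting scans and its services[0] fallback.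
--     return min(services, key=rank)
-- ===== Notes on version B (the rewrite author's own statement) =====
-- stated objective: simpler
-- what changed: Three sequential short-circuiting next() scans plus a fallback are replaced by one priority-rank function and a single min(services, key=rank) pass (min keeps the first element of minimal rank).
import Mathlib
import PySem

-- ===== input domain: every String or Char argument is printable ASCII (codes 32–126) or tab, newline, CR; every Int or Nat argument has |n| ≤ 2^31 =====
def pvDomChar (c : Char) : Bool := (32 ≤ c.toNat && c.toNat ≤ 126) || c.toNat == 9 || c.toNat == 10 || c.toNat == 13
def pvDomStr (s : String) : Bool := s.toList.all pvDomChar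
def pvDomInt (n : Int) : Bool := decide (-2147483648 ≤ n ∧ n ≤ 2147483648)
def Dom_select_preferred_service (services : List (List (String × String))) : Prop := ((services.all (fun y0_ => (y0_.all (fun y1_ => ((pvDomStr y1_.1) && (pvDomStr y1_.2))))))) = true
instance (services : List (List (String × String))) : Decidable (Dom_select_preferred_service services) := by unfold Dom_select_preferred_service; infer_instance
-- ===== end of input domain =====

-- B replaces A's three sequential short-circuiting scans by one rank function and a
-- single min(services, key=rank) pass (objective: simpler).

-- ===== PORT A =====
-- s[k] on a Python dict: first-match lookup in the association list (PySem.Dict).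
def pvLookup (s : List (String × String)) (k : String) : Option String :=
  PySem.Dict.get? (PySem.Dict.mk s) k

-- s['type'] / truthiness of s['secure'] (a string: truthy iff nonempty). Under
-- Pre_ the keys are present, so the getD defaults are never consulted.
def pvTy (s : List (String × String)) : String := (pvLookup s "type").getD ""
def pvSecure (s : List (String × String)) : Bool := (pvLookup s "secure").getD "" ≠ ""

-- the three generator predicates of A's next(…) calls
def pvIsWinrmHttps (s : List (String × String)) : Bool := pvTy s == "winrm" && pvSecure s
def pvIsSsh (s : List (String × String)) : Bool := pvTy s == "ssh"
def pvIsWinrmHttp (s : List (String × String)) : Bool := pvTy s == "winrm" && !pvSecure s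

-- A: three short-circuiting next(...) scans, then services[0].  A dict found by a
-- scan contains the key 'type', hence is nonempty, hence truthy: `if found:` is
-- exactly the `some` branch.
def select_preferred_service (services : List (List (String × String))) : Option (List (String × String)) :=
  if services.isEmpty then none
  else
    match services.find? pvIsWinrmHttps with
    | some s => some s
    | none =>
      match services.find? pvIsSsh with
      | some s => some s
      | none =>
        match services.find? pvIsWinrmHttp with
        | some s => some s
        | none => PySem.List.pyGet? services 0

-- ===== PORT B =====
-- Source B's inner rank function
def pvRank (s : List (String × String)) : Nat :=
  if pvTy s = "winrm" then (if pvSecure s then 0 else 2)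
  else if pvTy s = "ssh" then 1
  else 3

-- B: guard, then min(services, key=rank) (first element of minimal rank)
def select_preferred_service_alt (services : List (List (String × String))) : Option (List (String × String)) :=
  if services.isEmpty then none
  else PySem.List.min? services pvRank

-- ===== PRECONDITION & SPEC =====
-- Pre_ excludes lists containing a malformed service dict (no 'type' key, or a
-- winrm dict without 'secure'): there the Python programs raise KeyError —
-- except that A, scanning lazily, can still return a dict found before the
-- malformed one, a value B's single scoring pass cannot produce (it raises).
def Pre_select_preferred_service (services : List (List (String × String))) : Prop :=
  ∀ s ∈ services, (pvLookup s "type").isSome = true ∧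
    (pvLookup s "type" = some "winrm" → (pvLookup s "secure").isSome = true)
instance (services : List (List (String × String))) : Decidable (Pre_select_preferred_service services) := by
  unfold Pre_select_preferred_service; infer_instance

def pvWitness_select_preferred_service : (List (List (String × String))) :=
  [[("type", "winrm"), ("secure", "x")], [("type", "ssh")], [("type", "rdp")]]

def Spec_select_preferred_service (services : List (List (String × String))) (out : Option (List (String × String))) : Prop := out = select_preferred_service_alt services
instance (services : List (List (String × String))) (out : Option (List (String × String))) : Decidable (Spec_select_preferred_service services out) := by unfold Spec_select_preferred_service; infer_instance

-- ===== CLAIM (what is proved, stated in full; the proofs are below) =====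
def Claim_equal_select_preferred_service : Prop := ∀ (services : List (List (String × String))), Dom_select_preferred_service services → Pre_select_preferred_service services → Spec_select_preferred_service services (select_preferred_service services)

-- ===== LEMMAS AND PROOFS =====

-- the running "first minimum" of Python's min (strict < to replace)
def pvStep (m x : List (String × String)) : List (String × String) :=
  if pvRank x < pvRank m then x else m

theorem pv_min?_cons (t : List (List (String × String))) (h : List (String × String)) :
    PySem.List.min? (h :: t) pvRank = some (t.foldl pvStep h) := by
  simp only [PySem.List.min?, List.foldl_cons]
  induction t generalizing h with
  | nil => rfl
  | cons a t ih =>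
    simp only [List.foldl_cons, pvStep]
    split <;> exact ih _

-- first-minimum characterisation: if every rank is ≥ k and s is the first
-- element of rank exactly k, the running minimum ends at s.
theorem pv_fold_first_min (k : Nat) (l : List (List (String × String)))
    (h s : List (String × String))
    (hh : k ≤ pvRank h) (hl : ∀ x ∈ l, k ≤ pvRank x)
    (hf : List.find? (fun s => pvRank s == k) (h :: l) = some s) :
    l.foldl pvStep h = s := by
  induction l generalizing h with
  | nil =>
    rcases em (pvRank h = k) with hk | hk
    · rw [List.find?_cons_of_pos (by simp [hk])] at hf
      simpa using hf
    · rw [List.find?_cons_of_neg (by simp [hk])] at hf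
      exact absurd hf (by simp)
  | cons a t ih =>
    have hha : k ≤ pvRank a := hl a (by simp)
    have hlt : ∀ x ∈ t, k ≤ pvRank x := fun x hx => hl x (by simp [hx])
    rcases em (pvRank h = k) with hk | hk
    · have hsh : h = s := by
        rw [List.find?_cons_of_pos (by simp [hk])] at hf
        simpa using hf
      subst hsh
      simp only [List.foldl_cons, pvStep]
      rw [if_neg (by omega)]
      exact ih h hh hlt (by rw [List.find?_cons_of_pos (by simp [hk])])
    · rw [List.find?_cons_of_neg (by simp [hk])] at hf
      rcases em (pvRank a = k) with hak | hak
      · simp only [List.foldl_cons, pvStep]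
        rw [if_pos (by omega)]
        exact ih a hha hlt hf
      · rw [List.find?_cons_of_neg (by simp [hak])] at hf
        simp only [List.foldl_cons, pvStep]
        split
        · exact ih a hha hlt (by rw [List.find?_cons_of_neg (by simp [hak])]; exact hf)
        · exact ih h hh hlt (by rw [List.find?_cons_of_neg (by simp [hk])]; exact hf)

-- rank ↔ the three scan predicates (true on all inputs, Pre_ or not)
theorem pv_rank_eq_zero (s : List (String × String)) : pvRank s = 0 ↔ pvIsWinrmHttps s = true := by
  simp only [pvRank, pvIsWinrmHttps, Bool.and_eq_true, beq_iff_eq]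
  split_ifs <;> simp_all
theorem pv_rank_eq_one (s : List (String × String)) : pvRank s = 1 ↔ pvIsSsh s = true := by
  simp only [pvRank, pvIsSsh, beq_iff_eq]
  split_ifs <;> simp_all
theorem pv_rank_eq_two (s : List (String × String)) : pvRank s = 2 ↔ pvIsWinrmHttp s = true := by
  simp only [pvRank, pvIsWinrmHttp, Bool.and_eq_true, beq_iff_eq, Bool.not_eq_eq_eq_not, Bool.not_true]
  split_ifs <;> simp_all
theorem pv_rank_le (s : List (String × String)) : pvRank s ≤ 3 := by
  simp only [pvRank]; split_ifs <;> omega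

-- after a failed scan, every element has rank ≥ k+1
theorem pv_rank_ge_of_find_none {p : List (String × String) → Bool} {k : Nat}
    (hp : ∀ s, pvRank s = k ↔ p s = true)
    {l : List (List (String × String))} (hf : List.find? p l = none)
    (hge : ∀ x ∈ l, k ≤ pvRank x) : ∀ x ∈ l, k + 1 ≤ pvRank x := by
  intro x hx
  have := List.find?_eq_none.mp hf x hx
  have hne : pvRank x ≠ k := fun h => this ((hp x).mp h)
  have := hge x hx
  omega

theorem pv_min_of_find (k : Nat) {p : List (String × String) → Bool}
    (hp : ∀ s, pvRank s = k ↔ p s = true)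
    (h : List (String × String)) (t : List (List (String × String)))
    (hge : ∀ x ∈ h :: t, k ≤ pvRank x)
    {s : List (String × String)} (hf : List.find? p (h :: t) = some s) :
    PySem.List.min? (h :: t) pvRank = some s := by
  rw [pv_min?_cons]
  have hf' : List.find? (fun s => pvRank s == k) (h :: t) = some s := by
    have : (fun s => pvRank s == k) = p := by
      funext s
      rcases em (pvRank s = k) with h1 | h1
      · simp [h1, (hp s).mp h1]
      · cases hps : p s
        · simp [h1]
        · exact absurd ((hp s).mpr hps) h1
    rw [this]; exact hf
  exact congrArg some (pv_fold_first_min k t h s (hge h (by simp))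
    (fun x hx => hge x (by simp [hx])) hf')

-- ===== VERDICT (by name: the statement is the Claim_ definition above) =====
theorem select_preferred_service_spec : Claim_equal_select_preferred_service := by
  intro services _ _
  unfold Spec_select_preferred_service select_preferred_service select_preferred_service_alt
  cases services with
  | nil => rfl
  | cons h t =>
    simp only [List.isEmpty_cons, if_neg (by decide : ¬ false = true)]
    have hge0 : ∀ x ∈ h :: t, 0 ≤ pvRank x := fun x _ => Nat.zero_le _
    cases h0 : List.find? pvIsWinrmHttps (h :: t) with
    | some s => exact ((pv_min_of_find 0 pv_rank_eq_zero h t hge0 h0)).symm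
    | none =>
      have hge1 := pv_rank_ge_of_find_none pv_rank_eq_zero h0 hge0
      cases h1 : List.find? pvIsSsh (h :: t) with
      | some s => exact ((pv_min_of_find 1 pv_rank_eq_one h t hge1 h1)).symm
      | none =>
        have hge2 := pv_rank_ge_of_find_none pv_rank_eq_one h1 hge1
        cases h2 : List.find? pvIsWinrmHttp (h :: t) with
        | some s => exact ((pv_min_of_find 2 pv_rank_eq_two h t hge2 h2)).symm
        | none =>
          have hge3 := pv_rank_ge_of_find_none pv_rank_eq_two h2 hge2
          have hfh : List.find? (fun s => pvRank s == 3) (h :: t) = some h := by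
            rw [List.find?_cons_of_pos]
            simp only [beq_iff_eq]
            exact Nat.le_antisymm (pv_rank_le h) (hge3 h (by simp))
          have : PySem.List.min? (h :: t) pvRank = some h := by
            rw [pv_min?_cons]
            exact congrArg some (pv_fold_first_min 3 t h h
              (hge3 h (by simp)) (fun x hx => hge3 x (by simp [hx])) hfh)
          rw [this]
          simp [PySem.List.pyGet?, PySem.List.pyIdx?]
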